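-- pv_equiv track=rewrite | github.com/Y-LyN-10/Playground | ABChecker.py | check_ab_separation
-- ===== SOURCE A (Python) =====
-- def check_ab_separation(str):
-- 	counter = 0
--
-- 	for i in str:
-- 		if i == 'a':
-- 			counter = 0
-- 		elif i == 'b':
-- 			if counter == 3:
-- 				return True
-- 		else:
-- 			counter+=1
--
-- 	return False
-- ===== SOURCE B (Python) =====
-- def check_ab_separation(str):
--     return any(_segment_hits(seg) for seg in str.split('a'))
--
--
-- def _segment_hits(seg):
--     nonb = 0
--     for ch in seg:
--         if ch == 'b':
--             if nonb == 3:
--                 return True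
--         else:
--             nonb += 1
--     return False
-- ===== Notes on version B (the rewrite author's own statement) =====
-- stated objective: alternative
-- what changed: A's single loop with an explicit 'a'-reset branch is replaced by splitting the string on 'a' into segments and running a small non-'b' counter scan inside each segment (the reset branch disappears).
import Mathlib
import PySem

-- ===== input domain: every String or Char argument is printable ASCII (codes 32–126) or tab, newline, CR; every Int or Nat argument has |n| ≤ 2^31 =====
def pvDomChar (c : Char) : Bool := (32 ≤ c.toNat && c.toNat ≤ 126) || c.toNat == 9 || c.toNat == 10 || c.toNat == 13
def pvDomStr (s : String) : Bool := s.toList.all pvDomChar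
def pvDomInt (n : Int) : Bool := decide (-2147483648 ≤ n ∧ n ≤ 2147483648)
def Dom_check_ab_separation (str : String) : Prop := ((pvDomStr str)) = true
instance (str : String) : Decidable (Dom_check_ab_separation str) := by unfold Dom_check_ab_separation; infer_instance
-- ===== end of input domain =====

-- B replaces A's single loop (with an 'a'-reset branch) by split-on-'a' segmentation plus a
-- per-segment non-'b' counter scan; same O(n) cost, different decomposition.


-- ===== PORT A =====
-- the for-loop of A, with early return on 'b' when counter == 3
def pvALoop : List Char → Int → Bool
  | [], _ => false
  | c :: rest, counter =>
    if c = 'a' then pvALoop rest 0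
    else if c = 'b' then (if counter = 3 then true else pvALoop rest counter)
    else pvALoop rest (counter + 1)

def check_ab_separation (str : String) : Bool := pvALoop str.toList 0

-- ===== PORT B =====
-- _segment_hits of Source B: inner scan of one 'a'-free segment with a local non-'b' counter
def pvSegScan : List Char → Int → Bool
  | [], _ => false
  | c :: rest, nonb =>
    if c = 'b' then (if nonb = 3 then true else pvSegScan rest nonb)
    else pvSegScan rest (nonb + 1)

def check_ab_separation_alt (str : String) : Bool :=
  ((PySem.Str.split? str "a").getD []).any (fun seg => pvSegScan seg.toList 0)

-- ===== PRECONDITION & SPEC =====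
def Spec_check_ab_separation (str : String) (out : Bool) : Prop := out = check_ab_separation_alt str
instance (str : String) (out : Bool) : Decidable (Spec_check_ab_separation str out) := by unfold Spec_check_ab_separation; infer_instance

-- ===== CLAIM (what is proved, stated in full; the proofs are below) =====
def Claim_equal_check_ab_separation : Prop := ∀ (str : String), Dom_check_ab_separation str → Spec_check_ab_separation str (check_ab_separation str)

-- ===== LEMMAS AND PROOFS =====

-- a pure cons-recursive description of splitting a char list on 'a'
def mySplit : List Char → List (List Char)
  | [] => [[]]
  | c :: rest =>
    if c = 'a' then [] :: mySplit rest
    else (c :: (mySplit rest).headI) :: (mySplit rest).tail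

theorem mySplit_ne_nil (l : List Char) : mySplit l ≠ [] := by
  cases l with
  | nil => simp [mySplit]
  | cons c rest => simp only [mySplit]; split <;> simp

theorem modifyHead_fun_id {α : Type} (l : List α) : l.modifyHead (fun x => x) = l := by
  cases l <;> rfl

theorem go_eq_mySplit (fuel : Nat) : ∀ (l cur : List Char) (acc : List (List Char)),
    l.length ≤ fuel →
    PySem.Chars.splitOn.go ['a'] fuel l cur acc
      = acc.reverse ++ (mySplit l).modifyHead (cur.reverse ++ ·) := by
  induction fuel with
  | zero =>
    intro l cur acc h
    have : l = [] := List.eq_nil_of_length_eq_zero (Nat.le_zero.mp h)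
    subst this
    simp [PySem.Chars.splitOn.go, mySplit]
  | succ fuel ih =>
    intro l cur acc h
    cases l with
    | nil => simp [PySem.Chars.splitOn.go, mySplit]
    | cons c rest =>
      simp only [PySem.Chars.splitOn.go]
      by_cases hc : c = 'a'
      · subst hc
        have hpre : List.isPrefixOf ['a'] ('a' :: rest) = true := by
          simp [List.isPrefixOf]
        rw [if_pos hpre]
        have hlen : rest.length ≤ fuel := by
          simpa using Nat.succ_le_succ_iff.mp h
        rw [ih _ _ _ (by simpa using hlen)]
        simp [mySplit, modifyHead_fun_id]
      · have hpre : List.isPrefixOf ['a'] (c :: rest) = false := by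
          simp [List.isPrefixOf]
          exact fun hh => (hc hh.symm).elim
        rw [if_neg (by simp [hpre])]
        have hlen : rest.length ≤ fuel := Nat.succ_le_succ_iff.mp (by simpa using h)
        rw [ih _ _ _ hlen]
        have hne := mySplit_ne_nil rest
        simp only [mySplit, if_neg hc]
        cases hsp : mySplit rest with
        | nil => exact absurd hsp hne
        | cons s0 srest => simp

theorem splitOn_eq_mySplit (l : List Char) :
    PySem.Chars.splitOn l ['a'] = mySplit l := by
  have := go_eq_mySplit (l.length + 1) l [] [] (Nat.le_succ _)
  simpa [PySem.Chars.splitOn, modifyHead_fun_id] using this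

-- A's loop computes: scan the first segment with the current counter, remaining segments from 0
theorem aLoop_eq_segments (l : List Char) : ∀ (cnt : Int),
    pvALoop l cnt
      = (pvSegScan (mySplit l).headI cnt || ((mySplit l).tail).any (fun seg => pvSegScan seg 0)) := by
  induction l with
  | nil => intro cnt; simp [pvALoop, mySplit, pvSegScan]
  | cons c rest ih =>
    intro cnt
    by_cases hc : c = 'a'
    · subst hc
      simp only [pvALoop, mySplit]
      rw [ih 0]
      have hne := mySplit_ne_nil rest
      cases hsp : mySplit rest with
      | nil => exact absurd hsp hne
      | cons s0 srest => simp [pvSegScan]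
    · simp only [mySplit, if_neg hc, List.headI, List.tail]
      by_cases hb : c = 'b'
      · subst hb
        simp only [pvALoop, if_neg hc, pvSegScan]
        by_cases h3 : cnt = 3
        · simp [h3]
        · simp only [if_neg h3]
          exact ih cnt
      · simp only [pvALoop, if_neg hc, if_neg hb, pvSegScan]
        exact ih (cnt + 1)

theorem any_eq_headI_tail {P : List Char → Bool} (ls : List (List Char)) (h : ls ≠ []) :
    ls.any P = (P ls.headI || (ls.tail).any P) := by
  cases ls with
  | nil => exact absurd rfl h
  | cons a as => simp

-- ===== VERDICT (by name: the statement is the Claim_ definition above) =====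
theorem check_ab_separation_spec : Claim_equal_check_ab_separation := by
  intro s _
  unfold Spec_check_ab_separation check_ab_separation check_ab_separation_alt
  rw [show PySem.Str.split? s "a"
        = some (List.map String.ofList (PySem.Chars.splitOn s.toList ['a'])) from by
      simp [PySem.Str.split?, PySem.Chars.split?]]
  rw [splitOn_eq_mySplit]
  rw [aLoop_eq_segments s.toList 0]
  simp only [Option.getD_some, List.any_map, Function.comp_def, String.toList_ofList]
  exact (any_eq_headI_tail (P := fun seg => pvSegScan seg 0) _ (mySplit_ne_nil _)).symm
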